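-- pv_equiv track=rewrite | github.com/onelee85/AI-Media-Factory | tests/test_ux_completion.py | identify_drop_off
-- ===== SOURCE A (Python) =====
-- def identify_drop_off(flow_data: dict) -> dict:
--     """Identify which step has the highest drop-off rate.
--
--     Returns:
--         Dict with step names and their drop-off counts.
--     """
--     steps = ["input", "submit", "progress", "preview", "download"]
--     drop_offs = {}
--
--     for step in steps:
--         reached = sum(
--             1 for user_data in flow_data.values()
--             if user_data.get("steps", {}).get(step, False)
--         )
--         drop_offs[step] = len(flow_data) - reached
--
--     return drop_offs
-- ===== SOURCE B (Python) =====
-- def identify_drop_off(flow_data: dict) -> dict: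
--     """Identify which step has the highest drop-off rate, in one pass over users."""
--     n = len(flow_data)
--     c_input = c_submit = c_progress = c_preview = c_download = 0
--     for user_data in flow_data.values():
--         s = user_data.get("steps", {})
--         if s.get("input", False):
--             c_input += 1
--         if s.get("submit", False):
--             c_submit += 1
--         if s.get("progress", False):
--             c_progress += 1
--         if s.get("preview", False):
--             c_preview += 1
--         if s.get("download", False):
--             c_download += 1
--     return {
--         "input": n - c_input,
--         "submit": n - c_submit,
--         "progress": n - c_progress,
--         "preview": n - c_preview,
--         "download": n - c_download,
--     }
-- ===== Notes on version B (the rewrite author's own statement) =====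
-- stated objective: alternative
-- what changed: Replaces A's five separate scans of flow_data (one per funnel step) with a single pass maintaining five counters, emitting the fixed result dict afterwards.
import Mathlib
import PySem

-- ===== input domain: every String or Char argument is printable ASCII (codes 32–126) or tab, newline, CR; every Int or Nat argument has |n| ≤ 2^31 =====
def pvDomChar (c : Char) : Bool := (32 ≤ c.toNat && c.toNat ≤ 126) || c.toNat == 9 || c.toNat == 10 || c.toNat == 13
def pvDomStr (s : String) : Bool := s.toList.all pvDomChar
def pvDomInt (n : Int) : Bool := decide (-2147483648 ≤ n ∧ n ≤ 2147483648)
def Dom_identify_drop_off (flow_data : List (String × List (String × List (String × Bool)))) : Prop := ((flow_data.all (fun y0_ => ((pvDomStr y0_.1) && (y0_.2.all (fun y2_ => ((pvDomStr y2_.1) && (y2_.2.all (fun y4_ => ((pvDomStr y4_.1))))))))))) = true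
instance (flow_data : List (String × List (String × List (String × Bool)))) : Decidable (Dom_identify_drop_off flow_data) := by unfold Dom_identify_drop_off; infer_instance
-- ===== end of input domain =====

-- B replaces A's five scans of flow_data (one per funnel step) with a single pass keeping five counters (same cost class, different pass structure).


-- ===== PORT A =====
-- first-match association-list lookup = Python dict.get(k, dflt) under the task's type convention
def pyGetD {α : Type} (l : List (String × α)) (k : String) (dflt : α) : α :=
  match l with
  | [] => dflt
  | (k', v) :: t => if k' == k then v else pyGetD t k dflt

-- sum(1 for user_data in flow_data.values() if user_data.get("steps", {}).get(step, False))
def reachedA (flow_data : List (String × List (String × List (String × Bool)))) (step : String) : Int :=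
  flow_data.foldl (fun acc kv => if pyGetD (pyGetD kv.2 "steps" []) step false then acc + 1 else acc) 0

def identify_drop_off (flow_data : List (String × List (String × List (String × Bool)))) : List (String × Int) :=
  let steps := ["input", "submit", "progress", "preview", "download"]
  (steps.foldl
    (fun (drop_offs : PySem.Dict String Int) step =>
      drop_offs.insert step ((flow_data.length : Int) - reachedA flow_data step))
    PySem.Dict.empty).items

-- ===== PORT B =====
def identify_drop_off_alt (flow_data : List (String × List (String × List (String × Bool)))) : List (String × Int) :=
  let n : Int := flow_data.length
  let c := flow_data.foldl
    (fun (c : Int × Int × Int × Int × Int) kv =>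
      let s := pyGetD kv.2 "steps" []
      let c1 := if pyGetD s "input" false then c.1 + 1 else c.1
      let c2 := if pyGetD s "submit" false then c.2.1 + 1 else c.2.1
      let c3 := if pyGetD s "progress" false then c.2.2.1 + 1 else c.2.2.1
      let c4 := if pyGetD s "preview" false then c.2.2.2.1 + 1 else c.2.2.2.1
      let c5 := if pyGetD s "download" false then c.2.2.2.2 + 1 else c.2.2.2.2
      (c1, c2, c3, c4, c5))
    (0, 0, 0, 0, 0)
  [("input", n - c.1), ("submit", n - c.2.1), ("progress", n - c.2.2.1),
   ("preview", n - c.2.2.2.1), ("download", n - c.2.2.2.2)]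

-- ===== PRECONDITION & SPEC =====
def Spec_identify_drop_off (flow_data : List (String × List (String × List (String × Bool)))) (out : List (String × Int)) : Prop := out = identify_drop_off_alt flow_data
instance (flow_data : List (String × List (String × List (String × Bool)))) (out : List (String × Int)) : Decidable (Spec_identify_drop_off flow_data out) := by unfold Spec_identify_drop_off; infer_instance

-- ===== CLAIM (what is proved, stated in full; the proofs are below) =====
def Claim_equal_identify_drop_off : Prop := ∀ (flow_data : List (String × List (String × List (String × Bool)))), Dom_identify_drop_off flow_data → Spec_identify_drop_off flow_data (identify_drop_off flow_data)

-- ===== LEMMAS AND PROOFS =====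

-- shifting the initial accumulator of a counting fold
theorem foldl_count_shift {α : Type} (l : List α) (g : α → Bool) (x : Int) :
    l.foldl (fun acc a => if g a then acc + 1 else acc) x
      = x + l.foldl (fun acc a => if g a then acc + 1 else acc) 0 := by
  induction l generalizing x with
  | nil => simp
  | cons h2 t2 ih =>
    simp only [List.foldl_cons]
    rw [ih]
    conv_rhs => rw [ih]
    split_ifs <;> omega

-- peeling one user off A\'s per-step count
theorem reachedA_cons (hd : String × List (String × List (String × Bool)))
    (tl : List (String × List (String × List (String × Bool)))) (step : String) :
    reachedA (hd :: tl) step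
      = (if pyGetD (pyGetD hd.2 "steps" []) step false then (1 : Int) else 0)
          + reachedA tl step := by
  unfold reachedA
  simp only [List.foldl_cons]
  rw [foldl_count_shift]
  split_ifs <;> omega

-- B\'s one-pass fold computes the five per-step counts, shifted by the initial accumulator.
theorem foldlB_eq (flow_data : List (String × List (String × List (String × Bool))))
    (a b c d e : Int) :
    flow_data.foldl
      (fun (c : Int × Int × Int × Int × Int) kv =>
        let s := pyGetD kv.2 "steps" []
        let c1 := if pyGetD s "input" false then c.1 + 1 else c.1
        let c2 := if pyGetD s "submit" false then c.2.1 + 1 else c.2.1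
        let c3 := if pyGetD s "progress" false then c.2.2.1 + 1 else c.2.2.1
        let c4 := if pyGetD s "preview" false then c.2.2.2.1 + 1 else c.2.2.2.1
        let c5 := if pyGetD s "download" false then c.2.2.2.2 + 1 else c.2.2.2.2
        (c1, c2, c3, c4, c5))
      (a, b, c, d, e)
    = (a + reachedA flow_data "input", b + reachedA flow_data "submit",
       c + reachedA flow_data "progress", d + reachedA flow_data "preview",
       e + reachedA flow_data "download") := by
  induction flow_data generalizing a b c d e with
  | nil => simp [reachedA]
  | cons hd tl ih =>
    simp only [List.foldl_cons]
    rw [ih, reachedA_cons, reachedA_cons, reachedA_cons, reachedA_cons, reachedA_cons]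
    simp only [Prod.mk.injEq]
    refine ⟨?_, ?_, ?_, ?_, ?_⟩ <;> (split_ifs <;> omega)

-- ===== VERDICT (by name: the statement is the Claim_ definition above) =====
theorem identify_drop_off_spec : Claim_equal_identify_drop_off := by
  intro flow_data _
  unfold Spec_identify_drop_off identify_drop_off identify_drop_off_alt
  rw [foldlB_eq]
  simp [PySem.Dict.insert, PySem.Dict.empty, PySem.Dict.contains, List.foldl]
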